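-- pv_equiv track=rewrite | github.com/en0ndev/LeakLens | src/leaklens/detectors/context.py | _looks_secret_like_literal
-- ===== SOURCE A (Python) =====
-- def _looks_secret_like_literal(value: str) -> bool:
--     if len(value) < 16:
--         return False
--     if " " in value:
--         return False
--     has_upper = any(char.isupper() for char in value)
--     has_lower = any(char.islower() for char in value)
--     has_digit = any(char.isdigit() for char in value)
--     has_symbol = any(not char.isalnum() for char in value)
--     score = sum([has_upper, has_lower, has_digit, has_symbol])
--     return score >= 2
-- ===== SOURCE B (Python) =====
-- def _looks_secret_like_literal(value: str) -> bool:
--     if len(value) < 16 or " " in value: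
--         return False
--     up = lo = di = sy = False
--     for char in value:
--         up = up or char.isupper()
--         lo = lo or char.islower()
--         di = di or char.isdigit()
--         sy = sy or not char.isalnum()
--         if up + lo + di + sy >= 2:
--             return True
--     return False
-- ===== Notes on version B (the rewrite author's own statement) =====
-- stated objective: alternative
-- what changed: Replaced four independent any()-scans plus a sum over the flag list by a single fused pass that maintains the four character-class flags and returns early as soon as two flags are set.
import Mathlib
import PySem

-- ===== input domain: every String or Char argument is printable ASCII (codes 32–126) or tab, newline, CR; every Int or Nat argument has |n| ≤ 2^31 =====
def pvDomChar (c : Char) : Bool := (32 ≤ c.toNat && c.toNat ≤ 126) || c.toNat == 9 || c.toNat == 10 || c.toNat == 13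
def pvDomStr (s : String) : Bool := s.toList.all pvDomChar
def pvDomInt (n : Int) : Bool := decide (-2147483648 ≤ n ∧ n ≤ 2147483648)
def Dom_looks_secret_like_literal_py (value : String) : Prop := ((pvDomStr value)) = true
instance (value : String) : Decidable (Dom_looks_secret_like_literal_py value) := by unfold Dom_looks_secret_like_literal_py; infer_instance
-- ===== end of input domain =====

-- B fuses A's four any()-scans and flag sum into one pass over the characters
-- maintaining four flags, returning early once two flags are set (objective: alternative).


-- ===== PORT A =====
def looks_secret_like_literal_py (value : String) : Bool :=
  if PySem.Str.len value < 16 then false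
  else if PySem.Str.isIn " " value then false
  else
    let has_upper := value.toList.any PySem.Chars.isupper
    let has_lower := value.toList.any PySem.Chars.islower
    let has_digit := value.toList.any PySem.Chars.isdigit
    let has_symbol := value.toList.any (fun c => ! PySem.Chars.isalnum c)
    let score : Int := [has_upper, has_lower, has_digit, has_symbol].foldl
      (fun acc b => acc + (if b then 1 else 0)) 0
    decide (2 ≤ score)

-- ===== PORT B =====
def pvAltLoop : List Char → Bool → Bool → Bool → Bool → Bool
  | [], _, _, _, _ => false
  | c :: cs, up, lo, di, sy =>
    let up := up || PySem.Chars.isupper c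
    let lo := lo || PySem.Chars.islower c
    let di := di || PySem.Chars.isdigit c
    let sy := sy || ! PySem.Chars.isalnum c
    if 2 ≤ (if up then (1:Int) else 0) + (if lo then 1 else 0)
          + (if di then 1 else 0) + (if sy then 1 else 0) then true
    else pvAltLoop cs up lo di sy

def looks_secret_like_literal_py_alt (value : String) : Bool :=
  if PySem.Str.len value < 16 || PySem.Str.isIn " " value then false
  else pvAltLoop value.toList false false false false

-- ===== PRECONDITION & SPEC =====
def Spec_looks_secret_like_literal_py (value : String) (out : Bool) : Prop := out = looks_secret_like_literal_py_alt value
instance (value : String) (out : Bool) : Decidable (Spec_looks_secret_like_literal_py value out) := by unfold Spec_looks_secret_like_literal_py; infer_instance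

-- ===== CLAIM (what is proved, stated in full; the proofs are below) =====
def Claim_equal_looks_secret_like_literal_py : Prop := ∀ (value : String), Dom_looks_secret_like_literal_py value → Spec_looks_secret_like_literal_py value (looks_secret_like_literal_py value)

-- ===== LEMMAS AND PROOFS =====

def pvCount (up lo di sy : Bool) : Int :=
  (if up then (1:Int) else 0) + (if lo then 1 else 0)
  + (if di then 1 else 0) + (if sy then 1 else 0)

-- loop invariant: with fewer than two flags set so far, the early-exit loop
-- decides whether the flags over the WHOLE remaining list reach count 2
theorem pvAltLoop_spec (l : List Char) (up lo di sy : Bool)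
    (h : pvCount up lo di sy < 2) :
    pvAltLoop l up lo di sy =
      decide (2 ≤ pvCount (up || l.any PySem.Chars.isupper)
                    (lo || l.any PySem.Chars.islower)
                    (di || l.any PySem.Chars.isdigit)
                    (sy || l.any (fun c => ! PySem.Chars.isalnum c))) := by
  induction l generalizing up lo di sy with
  | nil =>
    simp only [pvAltLoop, List.any_nil, Bool.or_false]
    exact (decide_eq_false (by omega)).symm
  | cons c cs ih =>
    simp only [pvAltLoop, List.any_cons]
    by_cases h2 : 2 ≤ pvCount (up || PySem.Chars.isupper c) (lo || PySem.Chars.islower c)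
        (di || PySem.Chars.isdigit c) (sy || ! PySem.Chars.isalnum c)
    · rw [if_pos (by simpa [pvCount] using h2)]
      refine (decide_eq_true ?_).symm
      revert h2
      unfold pvCount
      cases up <;> cases lo <;> cases di <;> cases sy <;>
        cases PySem.Chars.isupper c <;> cases PySem.Chars.islower c <;>
        cases PySem.Chars.isdigit c <;> cases (! PySem.Chars.isalnum c) <;>
        simp <;> omega
    · rw [if_neg (by simpa [pvCount] using h2)]
      rw [ih _ _ _ _ (by omega)]
      simp [Bool.or_assoc]

-- ===== VERDICT (by name: the statement is the Claim_ definition above) =====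
theorem looks_secret_like_literal_py_spec : Claim_equal_looks_secret_like_literal_py := by
  intro value _
  unfold Spec_looks_secret_like_literal_py looks_secret_like_literal_py looks_secret_like_literal_py_alt
  by_cases hlen : PySem.Str.len value < 16
  · rw [if_pos hlen, if_pos (show (decide (PySem.Str.len value < 16) || PySem.Str.isIn " " value) = true by simp at hlen ⊢; exact Or.inl hlen)]
  · by_cases hsp : PySem.Str.isIn " " value = true
    · rw [if_neg hlen, if_pos hsp, if_pos (show (decide (PySem.Str.len value < 16) || PySem.Str.isIn " " value) = true by simp at hsp ⊢; exact Or.inr hsp)]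
    · rw [if_neg hlen, if_neg hsp, if_neg (show ¬ ((decide (PySem.Str.len value < 16) || PySem.Str.isIn " " value) = true) by simp at hlen hsp ⊢; exact ⟨hlen, hsp⟩)]
      rw [pvAltLoop_spec _ _ _ _ _ (by simp [pvCount])]
      simp only [pvCount, List.foldl, Bool.false_or]
      cases value.toList.any PySem.Chars.isupper <;>
      cases value.toList.any PySem.Chars.islower <;>
      cases value.toList.any PySem.Chars.isdigit <;>
      cases value.toList.any (fun c => ! PySem.Chars.isalnum c) <;> decide
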